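-- pv_equiv track=rewrite | github.com/Taltalite/paper_analysis | src/paper_analysis/tools/custom_tool.py | _run
-- ===== SOURCE A (Python) =====
-- from typing import List, Type
--
-- def _run(paper_text: str, keyword: str, max_hits: int = 5, window_chars: int = 220) -> str:
--     text = paper_text.replace("\r\n", "\n").replace("\r", "\n")
--     low_text = text.lower()
--     low_key = keyword.lower().strip()
--
--     if not low_key:
--         return "Keyword is empty."
--
--     hits: List[str] = []
--     start = 0
--
--     while len(hits) < max_hits:
--         idx = low_text.find(low_key, start)
--         if idx == -1:
--             break
--
--         left = max(0, idx - window_chars)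
--         right = min(len(text), idx + len(keyword) + window_chars)
--         snippet = text[left:right].strip().replace("\n", " ")
--         hits.append(f"[Hit {len(hits)+1}] ...{snippet}...")
--         start = idx + len(low_key)
--
--     if not hits:
--         return f"No match found for keyword: {keyword}"
--
--     return "\n".join(hits)
-- ===== SOURCE B (Python) =====
-- def _run(paper_text: str, keyword: str, max_hits: int = 5, window_chars: int = 220) -> str:
--     text = paper_text.replace("\r\n", "\n").replace("\r", "\n")
--     low_key = keyword.lower().strip()
--
--     if not low_key:
--         return "Keyword is empty."
--
--     # All non-overlapping match positions at once, via split on the lowered key.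
--     segments = text.lower().split(low_key)
--     indices = []
--     offset = 0
--     for seg in segments[:-1]:
--         offset += len(seg)
--         indices.append(offset)
--         offset += len(low_key)
--
--     indices = indices[:max(0, max_hits)]
--     if not indices:
--         return f"No match found for keyword: {keyword}"
--
--     out = []
--     for i, idx in enumerate(indices, 1):
--         left = max(0, idx - window_chars)
--         right = min(len(text), idx + len(keyword) + window_chars)
--         snippet = text[left:right].strip().replace("\n", " ")
--         out.append(f"[Hit {i}] ...{snippet}...")
--     return "\n".join(out)
-- ===== Notes on version B (the rewrite author's own statement) =====
-- stated objective: alternative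
-- what changed: Instead of A's while-loop that interleaves repeated find() calls with snippet formatting, B computes all non-overlapping match positions up front by splitting the lowered text on the lowered-stripped keyword and accumulating segment lengths, then formats only the first max(0, max_hits) positions in a separate enumerate pass.
import Mathlib
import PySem

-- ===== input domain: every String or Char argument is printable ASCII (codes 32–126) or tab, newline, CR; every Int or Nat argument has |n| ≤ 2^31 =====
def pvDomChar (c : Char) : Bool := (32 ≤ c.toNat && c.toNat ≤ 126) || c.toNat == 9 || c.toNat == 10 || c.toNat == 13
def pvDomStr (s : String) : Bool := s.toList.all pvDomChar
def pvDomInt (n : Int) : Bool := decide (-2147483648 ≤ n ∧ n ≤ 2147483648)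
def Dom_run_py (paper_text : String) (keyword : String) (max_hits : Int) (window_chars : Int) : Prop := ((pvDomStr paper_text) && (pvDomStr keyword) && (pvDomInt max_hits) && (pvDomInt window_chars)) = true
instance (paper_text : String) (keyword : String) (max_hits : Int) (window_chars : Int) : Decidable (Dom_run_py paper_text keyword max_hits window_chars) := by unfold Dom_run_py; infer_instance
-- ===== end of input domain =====

-- B re-implements A's incremental find-and-format loop by computing all match positions
-- up front from a split on the lowered keyword, then formatting the first max_hits of
-- them in one bounded pass (objective: alternative decomposition; same exact output).

-- ===== PORT A =====

-- snippet = text[left:right].strip().replace("\n", " ")  (A's in-loop formatting)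
def pvASnippet (text : List Char) (kwLen windowChars idx : Int) : List Char :=
  let left := max 0 (idx - windowChars)
  let right := min ((text.length : Int)) (idx + kwLen + windowChars)
  PySem.Chars.replace (PySem.Chars.strip (PySem.Chars.slice text (some left) (some right))) ['\n'] [' ']

-- the while loop of A; fuel only makes the recursion structural (start grows by
-- len(low_key) ≥ 1 each pass, so fuel = len(low_text) + 1 is never exhausted)
def pvALoop (text lowText lowKey : List Char) (kwLen maxHits windowChars : Int) :
    Nat → Nat → List (List Char) → List (List Char)
  | 0, _, hits => hits
  | fuel + 1, start, hits =>
    if (hits.length : Int) < maxHits then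
      let idx := PySem.Chars.findFrom lowText lowKey (start : Int)
      if idx = -1 then hits
      else
        let snippet := pvASnippet text kwLen windowChars idx
        pvALoop text lowText lowKey kwLen maxHits windowChars fuel
          (idx + (lowKey.length : Int)).toNat
          (hits ++ ["[Hit ".toList ++ PySem.Int.toChars ((hits.length : Int) + 1) ++
                    "] ...".toList ++ snippet ++ "...".toList])
    else hits

def run_py (paper_text : String) (keyword : String) (max_hits : Int) (window_chars : Int) : String :=
  let text := PySem.Chars.replace (PySem.Chars.replace paper_text.toList ['\r', '\n'] ['\n']) ['\r'] ['\n']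
  let lowText := PySem.Chars.lower text
  let lowKey := PySem.Chars.strip (PySem.Chars.lower keyword.toList)
  if lowKey.isEmpty then "Keyword is empty."
  else
    let hits := pvALoop text lowText lowKey (keyword.toList.length : Int) max_hits window_chars
      (lowText.length + 1) 0 []
    if hits.isEmpty then String.mk ("No match found for keyword: ".toList ++ keyword.toList)
    else String.mk (PySem.Chars.join ['\n'] hits)

-- ===== PORT B =====

-- same snippet formula as the task describes (B's formatting pass)
def pvBSnippet (text : List Char) (kwLen windowChars idx : Int) : List Char :=
  let left := max 0 (idx - windowChars)
  let right := min ((text.length : Int)) (idx + kwLen + windowChars)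
  PySem.Chars.replace (PySem.Chars.strip (PySem.Chars.slice text (some left) (some right))) ['\n'] [' ']

def run_py_alt (paper_text : String) (keyword : String) (max_hits : Int) (window_chars : Int) : String :=
  let text := PySem.Chars.replace (PySem.Chars.replace paper_text.toList ['\r', '\n'] ['\n']) ['\r'] ['\n']
  let lowKey := PySem.Chars.strip (PySem.Chars.lower keyword.toList)
  if lowKey.isEmpty then "Keyword is empty."
  else
    let segments := PySem.Chars.splitOn (PySem.Chars.lower text) lowKey
    let indices :=
      ((PySem.List.slice segments none (some (-1))).foldl
        (fun (acc : List Int × Int) seg =>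
          (acc.1 ++ [acc.2 + (seg.length : Int)], acc.2 + (seg.length : Int) + (lowKey.length : Int)))
        ([], 0)).1
    let indices := PySem.List.slice indices none (some (max 0 max_hits))
    if indices.isEmpty then String.mk ("No match found for keyword: ".toList ++ keyword.toList)
    else
      String.mk (PySem.Chars.join ['\n']
        ((PySem.List.enumerate indices 1).map (fun p =>
          "[Hit ".toList ++ PySem.Int.toChars p.1 ++ "] ...".toList ++
          pvBSnippet text (keyword.toList.length : Int) window_chars p.2 ++ "...".toList)))

-- ===== PRECONDITION & SPEC =====
def Spec_run_py (paper_text : String) (keyword : String) (max_hits : Int) (window_chars : Int) (out : String) : Prop := out = run_py_alt paper_text keyword max_hits window_chars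
instance (paper_text : String) (keyword : String) (max_hits : Int) (window_chars : Int) (out : String) : Decidable (Spec_run_py paper_text keyword max_hits window_chars out) := by unfold Spec_run_py; infer_instance

-- ===== CLAIM (what is proved, stated in full; the proofs are below) =====
def Claim_equal_run_py : Prop := ∀ (paper_text : String) (keyword : String) (max_hits : Int) (window_chars : Int), Dom_run_py paper_text keyword max_hits window_chars → Spec_run_py paper_text keyword max_hits window_chars (run_py paper_text keyword max_hits window_chars)

-- ===== LEMMAS AND PROOFS =====

-- positions of the successive non-overlapping occurrences of sep in s, offset by base
def pvIdx (sep s : List Char) (base : Int) : List Int :=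
  if hsep : sep = [] then []
  else
    if hf : PySem.Chars.find s sep = -1 then []
    else
      (base + ((PySem.Chars.find s sep).toNat : Int)) ::
        pvIdx sep (s.drop ((PySem.Chars.find s sep).toNat + sep.length))
          (base + ((PySem.Chars.find s sep).toNat : Int) + (sep.length : Int))
termination_by s.length
decreasing_by
  have h0 : 0 ≤ PySem.Chars.find s sep := by
    have := PySem.Chars.neg_one_le_find s sep; omega
  have hpre := (PySem.Chars.find_spec h0).1
  have hlen : (PySem.Chars.find s sep).toNat + sep.length ≤ s.length := by
    have := hpre.length_le
    rw [List.length_drop] at this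
    have hfl := PySem.Chars.find_le_length s sep
    omega
  have hsep1 : 1 ≤ sep.length := by
    cases sep with
    | nil => exact absurd rfl hsep
    | cons a t => simp
  simp only [List.length_drop]
  omega

-- the segments str.split(sep) produces, described by first occurrences
def pvPieces (sep s : List Char) : List (List Char) :=
  if hsep : sep = [] then [s]
  else
    if hf : PySem.Chars.find s sep = -1 then [s]
    else
      s.take (PySem.Chars.find s sep).toNat ::
        pvPieces sep (s.drop ((PySem.Chars.find s sep).toNat + sep.length))
termination_by s.length
decreasing_by
  have h0 : 0 ≤ PySem.Chars.find s sep := by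
    have := PySem.Chars.neg_one_le_find s sep; omega
  have hpre := (PySem.Chars.find_spec h0).1
  have hlen : (PySem.Chars.find s sep).toNat + sep.length ≤ s.length := by
    have := hpre.length_le
    rw [List.length_drop] at this
    have hfl := PySem.Chars.find_le_length s sep
    omega
  have hsep1 : 1 ≤ sep.length := by
    cases sep with
    | nil => exact absurd rfl hsep
    | cons a t => simp
  simp only [List.length_drop]
  omega

def pvConsHead (p : List Char) : List (List Char) → List (List Char)
  | [] => [p]
  | x :: xs => (p ++ x) :: xs

theorem pvPieces_ne_nil (sep s : List Char) : pvPieces sep s ≠ [] := by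
  unfold pvPieces
  split_ifs <;> simp

theorem pvFindGo_shift (sep : List Char) (hsep : sep ≠ []) :
    ∀ (l : List Char) (k : Nat),
      PySem.Chars.find.go sep l k =
        if PySem.Chars.find.go sep l 0 = -1 then -1 else (k : Int) + PySem.Chars.find.go sep l 0 := by
  intro l
  induction l with
  | nil =>
    intro k
    rw [PySem.Chars.find.go.eq_def]
    conv_rhs => rw [PySem.Chars.find.go.eq_def]
    simp [List.isEmpty_iff, hsep]
  | cons c t ih =>
    intro k
    rw [PySem.Chars.find.go.eq_def]
    conv_rhs => rw [PySem.Chars.find.go.eq_def]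
    by_cases hp : sep.isPrefixOf (c :: t) = true
    · simp [hp]
    · simp only [hp, if_false, Bool.false_eq_true]
      have hgt : PySem.Chars.find.go sep t 0 = PySem.Chars.find t sep := rfl
      have hge : -1 ≤ PySem.Chars.find.go sep t 0 := by
        rw [hgt]; exact PySem.Chars.neg_one_le_find t sep
      rw [ih (k + 1), ih 1]
      by_cases hm : PySem.Chars.find.go sep t 0 = -1
      · simp [hm]
      · have : ¬ ((1 : Int) + PySem.Chars.find.go sep t 0 = -1) := by omega
        simp only [hm, if_false]
        rw [if_neg (by push_cast at this ⊢; omega : ¬ ((1:Nat) : Int) + PySem.Chars.find.go sep t 0 = -1)]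
        push_cast
        ring

theorem pvFind_nil_of_ne (sep : List Char) (hsep : sep ≠ []) :
    PySem.Chars.find [] sep = -1 := by
  show PySem.Chars.find.go sep [] 0 = -1
  rw [PySem.Chars.find.go.eq_def]
  simp [List.isEmpty_iff, hsep]

theorem pvFind_cons_prefix (sep : List Char) (c : Char) (t : List Char)
    (hp : sep.isPrefixOf (c :: t) = true) : PySem.Chars.find (c :: t) sep = 0 := by
  show PySem.Chars.find.go sep (c :: t) 0 = 0
  rw [PySem.Chars.find.go.eq_def]
  simp [hp]

theorem pvFind_cons_not_prefix (sep : List Char) (hsep : sep ≠ []) (c : Char) (t : List Char)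
    (hp : ¬ sep.isPrefixOf (c :: t) = true) :
    PySem.Chars.find (c :: t) sep =
      if PySem.Chars.find t sep = -1 then -1 else 1 + PySem.Chars.find t sep := by
  show PySem.Chars.find.go sep (c :: t) 0 = _
  rw [PySem.Chars.find.go.eq_def]
  simp only [hp, if_false, Bool.false_eq_true]
  have := pvFindGo_shift sep hsep t 1
  simpa using this

theorem pvConsHead_consHead (p q : List Char) (P : List (List Char)) :
    pvConsHead p (pvConsHead q P) = pvConsHead (p ++ q) P := by
  cases P <;> simp [pvConsHead]

theorem pvConsHead_nil_of_ne_nil (P : List (List Char)) (h : P ≠ []) :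
    pvConsHead [] P = P := by
  cases P with
  | nil => exact absurd rfl h
  | cons x xs => simp [pvConsHead]

theorem pvPieces_cons_not_prefix (sep : List Char) (hsep : sep ≠ []) (c : Char) (t : List Char)
    (hp : ¬ sep.isPrefixOf (c :: t) = true) :
    pvPieces sep (c :: t) = pvConsHead [c] (pvPieces sep t) := by
  have hfc := pvFind_cons_not_prefix sep hsep c t hp
  by_cases hm : PySem.Chars.find t sep = -1
  · rw [if_pos hm] at hfc
    have hPt : pvPieces sep t = [t] := by rw [pvPieces]; simp [hsep, hm]
    rw [pvPieces, dif_neg hsep, dif_pos hfc, hPt]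
    simp [pvConsHead]
  · rw [if_neg hm] at hfc
    have h0 : 0 ≤ PySem.Chars.find t sep := by
      have := PySem.Chars.neg_one_le_find t sep; omega
    have hne : ¬ PySem.Chars.find (c :: t) sep = -1 := by rw [hfc]; omega
    have ht : (PySem.Chars.find (c :: t) sep).toNat = (PySem.Chars.find t sep).toNat + 1 := by
      rw [hfc]; omega
    have hPt : pvPieces sep t =
        List.take (PySem.Chars.find t sep).toNat t ::
          pvPieces sep (List.drop ((PySem.Chars.find t sep).toNat + sep.length) t) := by
      conv_lhs => rw [pvPieces]
      rw [dif_neg hsep, dif_neg hm]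
    conv_lhs => rw [pvPieces]
    rw [dif_neg hsep, dif_neg hne, ht, hPt]
    simp [pvConsHead, List.take_succ_cons, Nat.add_right_comm _ 1 _, List.drop_succ_cons]

theorem pvSplitOnGo_spec (sep : List Char) (hsep : sep ≠ []) :
    ∀ (fuel : Nat) (l cur : List Char) (acc : List (List Char)),
      l.length < fuel →
      PySem.Chars.splitOn.go sep fuel l cur acc =
        acc.reverse ++ pvConsHead cur.reverse (pvPieces sep l) := by
  intro fuel
  induction fuel using Nat.strong_induction_on with
  | _ fuel ih =>
    intro l cur acc hlen
    match fuel, l with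
    | f + 1, [] =>
      rw [PySem.Chars.splitOn.go.eq_def]
      rw [pvPieces]
      simp [hsep, pvFind_nil_of_ne sep hsep, pvConsHead]
    | f + 1, c :: rest =>
      rw [PySem.Chars.splitOn.go.eq_def]
      by_cases hp : sep.isPrefixOf (c :: rest) = true
      · simp only [hp, if_true]
        have hsl : 1 ≤ sep.length := by
          cases sep with
          | nil => exact absurd rfl hsep
          | cons a t => simp
        have hlt : (List.drop sep.length (c :: rest)).length < f := by
          simp only [List.length_drop, List.length_cons]
          simp only [List.length_cons] at hlen
          omega
        rw [ih f (by omega) _ [] _ hlt]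
        have hP := pvPieces_ne_nil sep (List.drop sep.length (c :: rest))
        rw [List.reverse_nil, pvConsHead_nil_of_ne_nil _ hP]
        -- right side: pvPieces sep (c :: rest) with find = 0
        have hRHS : pvPieces sep (c :: rest) =
            [] :: pvPieces sep (List.drop sep.length (c :: rest)) := by
          conv_lhs => rw [pvPieces]
          rw [dif_neg hsep, dif_neg (by rw [pvFind_cons_prefix sep c rest hp]; omega :
            ¬ PySem.Chars.find (c :: rest) sep = -1)]
          rw [pvFind_cons_prefix sep c rest hp]
          simp
        rw [hRHS]
        simp [pvConsHead]
      · simp only [hp, if_false, Bool.false_eq_true]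
        have hlt : rest.length < f := by simp at hlen; omega
        rw [ih f (by omega) rest (c :: cur) acc hlt]
        rw [pvPieces_cons_not_prefix sep hsep c rest hp]
        rw [List.reverse_cons, pvConsHead_consHead]

theorem pvSplitOn_eq_pieces (sep s : List Char) (hsep : sep ≠ []) :
    PySem.Chars.splitOn s sep = pvPieces sep s := by
  show PySem.Chars.splitOn.go sep (s.length + 1) s [] [] = _
  rw [pvSplitOnGo_spec sep hsep (s.length + 1) s [] [] (by omega)]
  simp [pvConsHead_nil_of_ne_nil _ (pvPieces_ne_nil sep s)]

theorem pvFold_pieces (sep : List Char) (hsep : sep ≠ []) :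
    ∀ (s : List Char) (acc : List Int) (base : Int),
      (((pvPieces sep s).dropLast).foldl
        (fun (a : List Int × Int) seg =>
          (a.1 ++ [a.2 + (seg.length : Int)], a.2 + (seg.length : Int) + (sep.length : Int)))
        (acc, base)).1 = acc ++ pvIdx sep s base := by
  suffices H : ∀ (n : Nat) (s : List Char), s.length ≤ n → ∀ (acc : List Int) (base : Int),
      (((pvPieces sep s).dropLast).foldl
        (fun (a : List Int × Int) seg =>
          (a.1 ++ [a.2 + (seg.length : Int)], a.2 + (seg.length : Int) + (sep.length : Int)))
        (acc, base)).1 = acc ++ pvIdx sep s base by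
    intro s acc base; exact H s.length s le_rfl acc base
  intro n
  induction n using Nat.strong_induction_on with
  | _ n ih =>
    intro s hsn acc base
    by_cases hm : PySem.Chars.find s sep = -1
    · have hP : pvPieces sep s = [s] := by rw [pvPieces]; simp [hsep, hm]
      have hI : pvIdx sep s base = [] := by rw [pvIdx]; simp [hsep, hm]
      simp [hP, hI]
    · have h0 : 0 ≤ PySem.Chars.find s sep := by
        have := PySem.Chars.neg_one_le_find s sep; omega
      have hpre := (PySem.Chars.find_spec h0).1
      have hfl := PySem.Chars.find_le_length s sep
      have hlen : (PySem.Chars.find s sep).toNat + sep.length ≤ s.length := by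
        have := hpre.length_le
        rw [List.length_drop] at this
        omega
      have hsl : 1 ≤ sep.length := by
        cases sep with
        | nil => exact absurd rfl hsep
        | cons a t => simp
      have hP : pvPieces sep s =
          List.take (PySem.Chars.find s sep).toNat s ::
            pvPieces sep (List.drop ((PySem.Chars.find s sep).toNat + sep.length) s) := by
        conv_lhs => rw [pvPieces]
        rw [dif_neg hsep, dif_neg hm]
      have hI : pvIdx sep s base =
          (base + ((PySem.Chars.find s sep).toNat : Int)) ::
            pvIdx sep (s.drop ((PySem.Chars.find s sep).toNat + sep.length))
              (base + ((PySem.Chars.find s sep).toNat : Int) + (sep.length : Int)) := by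
        conv_lhs => rw [pvIdx]
        rw [dif_neg hsep, dif_neg hm]
      rw [hP, hI]
      rw [List.dropLast_cons_of_ne_nil (pvPieces_ne_nil sep _)]
      rw [List.foldl_cons]
      have htake : ((List.take (PySem.Chars.find s sep).toNat s).length : Int) =
          ((PySem.Chars.find s sep).toNat : Int) := by
        rw [List.length_take]
        congr 1
        omega
      simp only [htake]
      rw [ih ((List.drop ((PySem.Chars.find s sep).toNat + sep.length) s).length)
        (by rw [List.length_drop]; omega) _ (by rw [List.length_drop]) _ _]
      simp [List.append_assoc]

def pvFmt (text : List Char) (kwLen windowChars : Int) (p : Int × Int) : List Char :=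
  "[Hit ".toList ++ PySem.Int.toChars p.1 ++ "] ...".toList ++
    pvASnippet text kwLen windowChars p.2 ++ "...".toList

theorem pvALoop_spec (text lowText lowKey : List Char) (hsep : lowKey ≠ [])
    (kwLen maxHits windowChars : Int) :
    ∀ (fuel k : Nat) (hs : List (List Char)),
      k ≤ lowText.length → lowText.length - k < fuel →
      pvALoop text lowText lowKey kwLen maxHits windowChars fuel k hs =
        hs ++ (PySem.List.enumerate
                 (List.take (maxHits - hs.length).toNat (pvIdx lowKey (lowText.drop k) k))
                 ((hs.length : Int) + 1)).map (pvFmt text kwLen windowChars) := by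
  have hsl : 1 ≤ lowKey.length := by
    cases lowKey with
    | nil => exact absurd rfl hsep
    | cons a t => simp
  intro fuel
  induction fuel with
  | zero => intro k hs hk hf; omega
  | succ f ih =>
    intro k hs hk hf
    rw [pvALoop]
    by_cases hmax : (hs.length : Int) < maxHits
    · simp only [if_pos hmax]
      rw [PySem.Chars.findFrom_natCast lowText lowKey k hk]
      by_cases hm : PySem.Chars.find (List.drop k lowText) lowKey = -1
      · simp only [if_pos hm]
        have hI : pvIdx lowKey (lowText.drop k) (k : Int) = [] := by
          rw [pvIdx]; simp [hsep, hm]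
        simp [hI]
      · have h0 : 0 ≤ PySem.Chars.find (List.drop k lowText) lowKey := by
          have := PySem.Chars.neg_one_le_find (List.drop k lowText) lowKey; omega
        have hpre := (PySem.Chars.find_spec h0).1
        obtain ⟨fn, hfn⟩ : ∃ fn : Nat, PySem.Chars.find (List.drop k lowText) lowKey = (fn : Int) :=
          ⟨_, (Int.toNat_of_nonneg h0).symm⟩
        rw [hfn] at hpre
        have hlen2 : fn + lowKey.length ≤ lowText.length - k := by
          have := hpre.length_le
          simp only [List.length_drop, Int.toNat_natCast] at this
          omega
        have hne : ¬ ((k : Int) + (fn : Int) = -1) := by omega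
        rw [hfn]
        have hne2 : ¬ ((fn : Int) = -1) := by omega
        simp only [if_neg hne2, if_neg hne]
        have hstart : ((k : Int) + (fn : Int) + (lowKey.length : Int)).toNat =
            k + fn + lowKey.length := by omega
        rw [hstart]
        rw [ih (k + fn + lowKey.length) _ (by omega) (by omega)]
        have hdd : (List.drop k lowText).drop (fn + lowKey.length) =
            lowText.drop (k + fn + lowKey.length) := by
          rw [List.drop_drop]; congr 1; omega
        have hI : pvIdx lowKey (lowText.drop k) (k : Int) =
            ((k : Int) + (fn : Int)) ::
              pvIdx lowKey (lowText.drop (k + fn + lowKey.length))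
                ((k : Int) + (fn : Int) + (lowKey.length : Int)) := by
          conv_lhs => rw [pvIdx]
          rw [dif_neg hsep, dif_neg hm, hfn]
          simp only [Int.toNat_natCast]
          rw [hdd]
        rw [hI]
        have hT : (maxHits - (hs.length : Int)).toNat =
            ((maxHits - (hs.length : Int)).toNat - 1) + 1 := by omega
        rw [hT, List.take_succ_cons, PySem.List.enumerate_cons, List.map_cons]
        have e1 : (maxHits - ((hs.length : Int) + 1)).toNat =
            (maxHits - (hs.length : Int)).toNat - 1 := by omega
        have e2 : ((k + fn + lowKey.length : Nat) : Int) =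
            (k : Int) + (fn : Int) + (lowKey.length : Int) := by push_cast; ring
        simp only [List.length_append, List.length_cons, List.length_nil, Nat.cast_add,
          Nat.cast_one, Nat.cast_zero, zero_add, e1, e2, pvFmt, List.append_assoc,
          List.cons_append, List.nil_append]
    · simp only [if_neg hmax]
      have hT : (maxHits - (hs.length : Int)).toNat = 0 := by omega
      rw [hT]
      simp

-- ===== VERDICT (by name: the statement is the Claim_ definition above) =====
theorem run_py_spec : Claim_equal_run_py := by
  unfold Claim_equal_run_py
  intro pt kw mh wc _
  unfold Spec_run_py
  show run_py pt kw mh wc = run_py_alt pt kw mh wc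
  unfold run_py run_py_alt
  by_cases hk : (PySem.Chars.strip (PySem.Chars.lower kw.toList)).isEmpty
  · simp only [hk, if_true]
  · simp only [hk, if_false, Bool.false_eq_true]
    have hsep : PySem.Chars.strip (PySem.Chars.lower kw.toList) ≠ [] := by
      simpa [List.isEmpty_iff] using hk
    rw [pvALoop_spec _ _ _ hsep _ _ _ _ 0 [] (Nat.zero_le _) (by omega)]
    rw [PySem.List.slice_to_neg_one]
    rw [pvSplitOn_eq_pieces _ _ hsep]
    rw [pvFold_pieces _ hsep _ [] 0]
    rw [PySem.List.slice_to _ (le_max_left 0 mh)]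
    have hmx : (mh - (([] : List (List Char)).length : Int)).toNat = (max 0 mh).toNat := by
      simp; omega
    rw [hmx, List.drop_zero, List.nil_append, List.nil_append]
    simp only [List.length_nil, Nat.cast_zero, zero_add]
    have hmap : ∀ (xs : List Int),
        (List.map (pvFmt (PySem.Chars.replace (PySem.Chars.replace pt.toList ['\r', '\n'] ['\n']) ['\r'] ['\n'])
            ((kw.toList.length : Int)) wc) (PySem.List.enumerate xs 1)).isEmpty = xs.isEmpty := by
      intro xs
      cases xs with
      | nil => simp [PySem.List.enumerate_nil]
      | cons a t => simp [PySem.List.enumerate_cons]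
    rw [hmap]
    by_cases he : (List.take (max 0 mh).toNat
        (pvIdx (PySem.Chars.strip (PySem.Chars.lower kw.toList))
          (PySem.Chars.lower (PySem.Chars.replace (PySem.Chars.replace pt.toList ['\r', '\n'] ['\n']) ['\r'] ['\n'])) 0)).isEmpty
    · rw [if_pos he, if_pos he]
    · rw [if_neg he, if_neg he]
      apply congrArg String.mk
      apply congrArg
      apply List.map_congr_left
      intro p _
      simp [pvFmt, pvASnippet, pvBSnippet]
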